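-- pv_equiv track=rewrite | github.com/BelyiViktor/VK-education-algorithms | the_last_even_number.py | last_even
-- ===== SOURCE A (Python) =====
-- def last_even(arr):
--     answer = []
--     for elem in arr:
--         if elem % 2 == 0:
--             answer.append(elem)
--     if len(answer) == 0:
--         return -1
--     else:
--         return answer.pop()
-- ===== SOURCE B (Python) =====
-- def last_even(arr):
--     for elem in reversed(arr):
--         if elem % 2 == 0:
--             return elem
--     return -1
-- ===== Notes on version B (the rewrite author's own statement) =====
-- stated objective: idiomatic
-- what changed: B scans the list in reverse and returns the first even element immediately (no accumulator list, early exit), instead of A's forward pass collecting all evens into a list and popping the last.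
import Mathlib
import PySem

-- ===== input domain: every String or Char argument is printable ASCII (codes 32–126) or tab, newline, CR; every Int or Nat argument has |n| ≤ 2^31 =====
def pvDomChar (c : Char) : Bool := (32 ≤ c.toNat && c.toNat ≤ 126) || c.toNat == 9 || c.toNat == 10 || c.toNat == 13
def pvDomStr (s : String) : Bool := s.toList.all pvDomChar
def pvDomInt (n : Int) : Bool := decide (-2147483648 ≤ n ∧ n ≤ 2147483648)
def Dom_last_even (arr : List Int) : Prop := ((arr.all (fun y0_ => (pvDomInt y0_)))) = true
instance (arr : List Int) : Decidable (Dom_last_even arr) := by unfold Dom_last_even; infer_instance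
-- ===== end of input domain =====

-- B scans in reverse and returns the first even immediately; A collects all evens then pops (idiomatic rewrite, return value proved equal).

-- ===== PORT A =====
def last_even (arr : List Int) : Int :=
  let answer : List Int :=
    arr.foldl (fun acc elem => if PySem.Int.mod elem 2 = 0 then acc ++ [elem] else acc) []
  if answer.length = 0 then -1
  else
    match PySem.List.pop? answer (-1) with
    | some r => r.1
    | none => -1  -- unreachable: answer is nonempty

-- ===== PORT B =====
def lastEvenGo : List Int → Int
  | [] => -1
  | x :: xs => if PySem.Int.mod x 2 = 0 then x else lastEvenGo xs

def last_even_alt (arr : List Int) : Int :=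
  lastEvenGo arr.reverse

-- ===== PRECONDITION & SPEC =====
def Spec_last_even (arr : List Int) (out : Int) : Prop := out = last_even_alt arr
instance (arr : List Int) (out : Int) : Decidable (Spec_last_even arr out) := by unfold Spec_last_even; infer_instance

-- ===== CLAIM (what is proved, stated in full; the proofs are below) =====
def Claim_equal_last_even : Prop := ∀ (arr : List Int), Dom_last_even arr → Spec_last_even arr (last_even arr)

-- ===== LEMMAS AND PROOFS =====
theorem foldl_filter (l acc : List Int) :
    l.foldl (fun acc elem => if PySem.Int.mod elem 2 = 0 then acc ++ [elem] else acc) acc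
      = acc ++ l.filter (fun e => decide (PySem.Int.mod e 2 = 0)) := by
  induction l generalizing acc with
  | nil => simp
  | cons x xs ih =>
    rw [List.foldl_cons, List.filter_cons]
    by_cases h : PySem.Int.mod x 2 = 0
    · rw [if_pos h, ih, if_pos (by simpa using h)]; simp
    · rw [if_neg h, ih, if_neg (by simpa using h)]

theorem lastEvenGo_head (l : List Int) :
    lastEvenGo l = (l.filter (fun e => decide (PySem.Int.mod e 2 = 0))).headD (-1) := by
  induction l with
  | nil => rfl
  | cons x xs ih =>
    rw [List.filter_cons]
    by_cases h : PySem.Int.mod x 2 = 0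
    · rw [if_pos (by simpa using h)]
      simp only [lastEvenGo]
      rw [if_pos h, List.headD_cons]
    · rw [if_neg (by simpa using h)]
      simp only [lastEvenGo]
      rw [if_neg h, ih]

theorem pop_last_match (l : List Int) (hne : l ≠ []) :
    (match PySem.List.pop? l with | some r => r.1 | none => (-1 : Int))
      = l.getLastD (-1) := by
  have hp := PySem.List.pop?_last l.dropLast (l.getLast hne)
  rw [List.dropLast_append_getLast hne] at hp
  rw [hp]
  simp [List.getLastD_eq_getLast?, List.getLast?_eq_some_getLast hne]

theorem main_eq (arr : List Int) : last_even arr = last_even_alt arr := by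
  unfold last_even last_even_alt
  rw [foldl_filter, List.nil_append, lastEvenGo_head, List.filter_reverse]
  cases hl : arr.filter (fun e => decide (PySem.Int.mod e 2 = 0)) with
  | nil => simp
  | cons a as =>
    have hne : a :: as ≠ ([] : List Int) := by simp
    rw [if_neg (by simp), pop_last_match _ hne]
    simp only [List.headD_eq_head?, List.head?_reverse, List.getLastD_eq_getLast?]

-- ===== VERDICT (by name: the statement is the Claim_ definition above) =====
theorem last_even_spec : Claim_equal_last_even := by
  intro arr _
  exact main_eq arr
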